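-- pv_equiv track=rewrite | github.com/EugeneJoe/HackerRank | Bonetrousle.py | bonetrousle
-- ===== SOURCE A (Python) =====
-- def Sn(n,a,d=1):
--     return (n*(2*a+(n-1)*d))//2  # Generate sum of arithmetic series or progression
--
-- def bonetrousle(n, k, b):
--     lower = Sn(b,1)  # Find lowest possible sum from 1 with b elements in the arithmetic series
--     upper = Sn(b,k-b+1)  # Find the largest possible sum from k-b+1 with b elements in the arithmetic series
--     if n<lower or n>upper:
--         return [-1]
--     total = Sn(b,1)  # Start from lowest sum
--     arr = list(range(1,b+1))  # i.e 1, 2, 3, 4 for b=4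
--     while total<n:
--         add = min(k-arr[b-1],n-total)  # find the largest number we can add for each array element to get total to reach n. Constrains are has to be less than k and each element must be unique
--         arr[b-1]+=add
--         total+=add
--         b-=1  # start from rightmost array element and move left till we get to the smallest element
--         k-=1  # reduce value of k to ensure each element is unique
--     return (i for i in arr)
-- ===== SOURCE B (Python) =====
-- def bonetrousle(n, k, b):
--     lower = b * (b + 1) // 2
--     upper = b * (2 * k - b + 1) // 2
--     if n < lower or n > upper:
--         return [-1]
--     extra = n - lower
--     if extra:
--         q, r = divmod(extra, k - b)
--     else:
--         q, r = 0, 0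
--     return (i + ((k - b) if i > b - q else (r if i == b - q else 0))
--             for i in range(1, b + 1))
-- ===== Notes on version B (the rewrite author's own statement) =====
-- stated objective: simpler
-- what changed: A mutates the array in a right-to-left while loop, re-reading and rewriting arr[b-1] and decrementing b and k each step; B computes q,r = divmod(n-lower, k-b) once and emits each element by a closed-form expression in a single generator, with no mutation.
import Mathlib
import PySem

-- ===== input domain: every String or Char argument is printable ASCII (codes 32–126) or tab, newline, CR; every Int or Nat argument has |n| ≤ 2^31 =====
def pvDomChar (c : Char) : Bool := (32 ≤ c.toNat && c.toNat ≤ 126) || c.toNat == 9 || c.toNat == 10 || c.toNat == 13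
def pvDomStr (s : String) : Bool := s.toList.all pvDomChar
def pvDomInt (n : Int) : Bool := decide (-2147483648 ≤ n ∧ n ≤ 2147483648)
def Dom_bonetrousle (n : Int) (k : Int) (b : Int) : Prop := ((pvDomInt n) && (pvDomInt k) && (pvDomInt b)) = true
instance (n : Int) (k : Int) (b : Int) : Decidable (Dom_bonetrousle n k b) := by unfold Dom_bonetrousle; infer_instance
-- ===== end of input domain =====

-- B replaces A's destructive right-to-left while loop by a divmod closed form and a single
-- generator expression (objective: simpler). A returns a generator on success; both ports
-- return the list of produced values (return-value equivalence).

-- ===== PORT A =====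
def pySn (n : Int) (a : Int) (d : Int) : Int :=
  PySem.Int.floordiv (n * (2 * a + (n - 1) * d)) 2

-- the while loop of A; fuel = b.toNat suffices on Pre_ (the loop runs at most b times there);
-- arr[b-1] is read with pyGetD and written with List.set at (b-1).toNat — exact, since on Pre_
-- the index b-1 always satisfies 0 ≤ b-1 < len(arr) whenever the loop body runs
def loopA (fuel : Nat) (n : Int) (arr : List Int) (total : Int) (b : Int) (k : Int) : List Int :=
  match fuel with
  | 0 => arr
  | f + 1 =>
    if total < n then
      let cur := PySem.List.pyGetD arr (b - 1) 0
      let add := min (k - cur) (n - total)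
      loopA f n (arr.set (b - 1).toNat (cur + add)) (total + add) (b - 1) (k - 1)
    else arr

def bonetrousle (n : Int) (k : Int) (b : Int) : List Int :=
  let lower := pySn b 1 1
  let upper := pySn b (k - b + 1) 1
  if n < lower ∨ n > upper then [-1]
  else
    let total := pySn b 1 1
    let arr := PySem.List.pyRange 1 (b + 1) 1
    loopA b.toNat n arr total b k

-- ===== PORT B =====
def bonetrousle_alt (n : Int) (k : Int) (b : Int) : List Int :=
  let lower := PySem.Int.floordiv (b * (b + 1)) 2
  let upper := PySem.Int.floordiv (b * (2 * k - b + 1)) 2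
  if n < lower ∨ n > upper then [-1]
  else
    let extra := n - lower
    let qr := if extra ≠ 0 then (PySem.Int.divmod? extra (k - b)).getD (0, 0) else (0, 0)
    (PySem.List.pyRange 1 (b + 1) 1).map
      (fun i => i + (if i > b - qr.1 then k - b else if i = b - qr.1 then qr.2 else 0))

-- ===== PRECONDITION & SPEC =====
-- Pre_ excludes exactly the inputs where A raises IndexError (empty arr indexed in the loop):
-- b < 0 together with lower < n ≤ upper; everywhere A returns, Pre_ holds.
def Pre_bonetrousle (n : Int) (k : Int) (b : Int) : Prop :=
  0 ≤ b ∨ n ≤ PySem.Int.floordiv (b * (b + 1)) 2 ∨ PySem.Int.floordiv (b * (2 * k - b + 1)) 2 < n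
instance (n : Int) (k : Int) (b : Int) : Decidable (Pre_bonetrousle n k b) := by
  unfold Pre_bonetrousle; infer_instance
def pvWitness_bonetrousle : Int × Int × Int := (10, 5, 3)

def Spec_bonetrousle (n : Int) (k : Int) (b : Int) (out : List Int) : Prop := out = bonetrousle_alt n k b
instance (n : Int) (k : Int) (b : Int) (out : List Int) : Decidable (Spec_bonetrousle n k b out) := by unfold Spec_bonetrousle; infer_instance

-- ===== CLAIM (what is proved, stated in full; the proofs are below) =====
def Claim_equal_bonetrousle : Prop := ∀ (n : Int) (k : Int) (b : Int), Dom_bonetrousle n k b → Pre_bonetrousle n k b → Spec_bonetrousle n k b (bonetrousle n k b)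

-- ===== LEMMAS AND PROOFS =====

-- the value added to element i in the final/intermediate shapes of the array
def bump (c s r i : Int) : Int := i + (if c < i then s else if i = c then r else 0)

lemma loopA_stop (fuel : Nat) (n : Int) (arr : List Int) (total b k : Int)
    (h : ¬ total < n) : loopA fuel n arr total b k = arr := by
  cases fuel <;> simp [loopA, h]

lemma map_bump_zero (b s : Int) :
    (PySem.List.pyRange 1 (b + 1) 1).map (bump b s 0) = PySem.List.pyRange 1 (b + 1) 1 := by
  have h : ∀ i ∈ PySem.List.pyRange 1 (b + 1) 1, bump b s 0 i = id i := by
    intro i hi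
    rw [PySem.List.mem_pyRange_one] at hi
    unfold bump
    split_ifs <;> simp <;> omega
  rw [List.map_congr_left h, List.map_id]

-- updating the arr of shape (bump c s r) at position b-j-1 (value b-j) gives another shape
lemma set_map_bump (b j v : Int) (f g : Int → Int)
    (hj0 : 0 ≤ j) (hjb : j < b)
    (hagree : ∀ i, 1 ≤ i → i ≤ b → i ≠ b - j → f i = g i)
    (hv : g (b - j) = b - j + v) :
    ((PySem.List.pyRange 1 (b + 1) 1).map f).set (b - j - 1).toNat (b - j + v)
      = (PySem.List.pyRange 1 (b + 1) 1).map g := by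
  have hlen : (PySem.List.pyRange 1 (b + 1) 1).length = b.toNat := by
    rw [PySem.List.length_pyRange_one]; omega
  apply List.ext_getElem
  · simp
  · intro m hm1 hm2
    simp only [List.getElem_set, List.getElem_map, PySem.List.getElem_pyRange_one]
    by_cases hmeq : (b - j - 1).toNat = m
    · rw [if_pos hmeq]
      have : (1 : Int) + (m : Int) = b - j := by omega
      rw [this, hv]
    · rw [if_neg hmeq]
      simp only [List.length_map, hlen] at hm2
      exact hagree _ (by omega) (by omega) (by omega)

-- the loop invariant: after j iterations the array is the j-shape; running the loop to the
-- end produces the (q,r)-shape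
lemma loopA_char (n lower b k slack q r : Int)
    (hslack : slack = k - b) (hs : 1 ≤ slack)
    (hq0 : 0 ≤ q) (hqb : q ≤ b) (hr0 : 0 ≤ r) (hrs : r < slack)
    (hqr : q = b → r = 0) (hn : n = lower + q * slack + r) :
    ∀ (fuel : Nat) (j : Int), 0 ≤ j → j ≤ q → b - j ≤ (fuel : Int) →
      loopA fuel n ((PySem.List.pyRange 1 (b + 1) 1).map (bump (b - j) slack 0))
        (lower + j * slack) (b - j) (k - j)
      = (PySem.List.pyRange 1 (b + 1) 1).map (bump (b - q) slack r) := by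
  intro fuel
  induction fuel with
  | zero =>
    intro j hj0 hjq hfuel
    simp only [Nat.cast_zero] at hfuel
    have hjb : j = b := by omega
    have hjq' : j = q := by omega
    have hrr : r = 0 := hqr (by omega)
    subst hjq' hrr
    simp [loopA]
  | succ f ih =>
    intro j hj0 hjq hfuel
    by_cases hcond : lower + j * slack < n
    · -- loop body runs; in particular j < b (else j = b = q, r = 0, total = n)
      have hjltb : j < b := by
        rcases lt_or_eq_of_le hjq with h | h
        · omega
        · subst h
          have hne : ¬ j = b := fun hb => by have := hqr hb; omega
          omega
      have hget : PySem.List.pyGetD ((PySem.List.pyRange 1 (b + 1) 1).map (bump (b - j) slack 0)) (b - j - 1) 0 = b - j := by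
        have hlen : (PySem.List.pyRange 1 (b + 1) 1).length = b.toNat := by
          rw [PySem.List.length_pyRange_one]; omega
        rw [PySem.List.pyGetD_eq_getElem _ _ (by omega) (by simp [hlen]; omega)]
        rw [List.getElem_map, PySem.List.getElem_pyRange_one]
        have h1 : (1 : Int) + ((b - j - 1).toNat : Int) = b - j := by omega
        rw [h1]
        unfold bump
        split_ifs <;> omega
      rw [loopA]
      rw [if_pos hcond]
      simp only [hget]
      have hkj : k - j - (b - j) = slack := by omega
      by_cases hjq' : j < q
      · -- full bump by slack
        have hbig : slack ≤ n - (lower + j * slack) := by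
          have h1 : (j + 1) * slack ≤ q * slack :=
            mul_le_mul_of_nonneg_right (by omega) (by omega)
          nlinarith
        have hmin : min (k - j - (b - j)) (n - (lower + j * slack)) = slack := by
          rw [hkj]; exact min_eq_left hbig
        rw [hmin]
        rw [set_map_bump b j slack (bump (b - j) slack 0) (bump (b - (j + 1)) slack 0)
          (by omega) hjltb
          (by intro i hi1 hib hine; unfold bump; split_ifs <;> omega)
          (by unfold bump; split_ifs <;> omega)]
        have h2 : lower + j * slack + slack = lower + (j + 1) * slack := by ring
        have h3 : b - j - 1 = b - (j + 1) := by ring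
        have h4 : k - j - 1 = k - (j + 1) := by ring
        rw [h2, h3, h4]
        exact ih (j + 1) (by omega) (by omega) (by push_cast at hfuel ⊢; omega)
      · -- j = q : partial bump by r, then the loop stops
        have hjq'' : j = q := by omega
        subst hjq''
        have hrpos : 0 < r := by nlinarith
        have hsmall : n - (lower + j * slack) = r := by omega
        have hmin : min (k - j - (b - j)) (n - (lower + j * slack)) = r := by
          rw [hkj, hsmall]; exact min_eq_right (by omega)
        rw [hmin]
        rw [set_map_bump b j r (bump (b - j) slack 0) (bump (b - j) slack r)
          (by omega) hjltb
          (by intro i hi1 hib hine; unfold bump; split_ifs <;> omega)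
          (by unfold bump; split_ifs <;> omega)]
        exact loopA_stop _ _ _ _ _ _ (by omega)
    · -- the loop condition already fails: j = q and r = 0
      rw [loopA, if_neg hcond]
      have h1 : j * slack ≤ q * slack := mul_le_mul_of_nonneg_right hjq (by omega)
      have hjq2 : j = q := by
        by_contra hne
        have h2 := mul_le_mul_of_nonneg_right (show j + 1 ≤ q by omega) (show (0:Int) ≤ slack by omega)
        nlinarith
      subst hjq2
      have hr' : r = 0 := by omega
      rw [hr']

-- exact value of upper - lower
lemma upper_sub_lower (k b : Int) :
    PySem.Int.floordiv (b * (2 * k - b + 1)) 2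
      = PySem.Int.floordiv (b * (b + 1)) 2 + b * (k - b) := by
  have h1 : b * (2 * k - b + 1) = b * (b + 1) + b * (k - b) * 2 := by ring
  rw [h1, PySem.Int.floordiv_eq_ediv_of_pos (by norm_num),
      PySem.Int.floordiv_eq_ediv_of_pos (by norm_num)]
  rw [Int.add_mul_ediv_right _ _ (by norm_num : (2:Int) ≠ 0)]

-- ===== VERDICT (by name: the statement is the Claim_ definition above) =====
theorem bonetrousle_spec : Claim_equal_bonetrousle := by
  intro n k b _ hpre
  unfold Spec_bonetrousle bonetrousle bonetrousle_alt
  have hlow : pySn b 1 1 = PySem.Int.floordiv (b * (b + 1)) 2 := by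
    unfold pySn; congr 1; ring
  have hup : pySn b (k - b + 1) 1 = PySem.Int.floordiv (b * (2 * k - b + 1)) 2 := by
    unfold pySn; congr 1; ring
  rw [hlow, hup]
  set lower := PySem.Int.floordiv (b * (b + 1)) 2 with hlowdef
  set upper := PySem.Int.floordiv (b * (2 * k - b + 1)) 2 with hupdef
  by_cases hg : n < lower ∨ n > upper
  · rw [if_pos hg, if_pos hg]
  · rw [if_neg hg, if_neg hg]
    push_neg at hg
    obtain ⟨hgl, hgu⟩ := hg
    have hul : upper = lower + b * (k - b) := upper_sub_lower k b
    by_cases hex : n - lower = 0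
    · -- extra = 0: the loop never runs, B adds nothing
      simp only [hex, ne_eq, not_true_eq_false, if_false]
      rw [loopA_stop _ _ _ _ _ _ (by omega)]
      have h : ∀ i ∈ PySem.List.pyRange 1 (b + 1) 1,
          i + (if i > b - (0:Int) then k - b else if i = b - (0:Int) then (0:Int) else 0) = id i := by
        intro i hi
        rw [PySem.List.mem_pyRange_one] at hi
        split_ifs <;> simp <;> omega
      rw [List.map_congr_left h, List.map_id]
    · -- extra > 0: main case
      have hexpos : 0 < n - lower := by omega
      have hprod : 0 < b * (k - b) := by omega
      have hb0 : 0 ≤ b := by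
        rcases hpre with h | h | h
        · exact h
        · omega
        · omega
      have hb1 : 1 ≤ b := by
        rcases lt_or_eq_of_le hb0 with h | h
        · omega
        · exfalso; rw [← h] at hprod; simp at hprod
      have hs : 1 ≤ k - b := by nlinarith
      simp only [hex, ne_eq, not_false_eq_true, if_true]
      have hdm : (PySem.Int.divmod? (n - lower) (k - b)).getD (0, 0)
          = (PySem.Int.floordiv (n - lower) (k - b), PySem.Int.mod (n - lower) (k - b)) := by
        have hne : k - b ≠ 0 := by omega
        simp [PySem.Int.divmod?, hne, PySem.Int.floordiv, PySem.Int.mod]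
      rw [hdm]
      set q := PySem.Int.floordiv (n - lower) (k - b) with hqdef
      set r := PySem.Int.mod (n - lower) (k - b) with hrdef
      have hr0 : 0 ≤ r := PySem.Int.mod_nonneg _ (by omega)
      have hrs : r < k - b := PySem.Int.mod_lt _ (by omega)
      have hqr : q * (k - b) + r = n - lower := PySem.Int.floordiv_mul_add_mod _ _
      have hq0 : 0 ≤ q := by
        have := (PySem.Int.le_floordiv_iff_mul_le (a := n - lower) (q := 0) (by omega : (0:Int) < k - b)).2 (by omega)
        omega
      have hqb : q ≤ b := by
        have := (PySem.Int.floordiv_lt_iff_lt_mul (a := n - lower) (q := b + 1) (by omega : (0:Int) < k - b)).2 (by nlinarith)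
        omega
      have hqrb : q = b → r = 0 := by
        intro hqb'; rw [hqb'] at hqr; omega
      have hmain := loopA_char n lower b k (k - b) q r rfl hs hq0 hqb hr0 hrs hqrb
        (by omega) b.toNat 0 (by omega) (by omega) (by omega)
      simp only [sub_zero, zero_mul, add_zero, map_bump_zero] at hmain
      rw [hmain]
      apply List.map_congr_left
      intro i _
      unfold bump
      rfl
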